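-- pv_equiv track=rewrite | github.com/fkjkkll/PG-Task | Optimization theory algorithm/Linear Programming/func.py | findrnum
-- ===== SOURCE A (Python) =====
-- def findrnum(s, index):
--     '''
--     s:传入的字符串
--     index:当前字符串第一个字符'x'的下标
--     findnum的子函数：
--     找到字符串中'x'右侧的一个数字
--     '''
--     num=[]
--     realnum = 0
--     index = index + 1
--     while index<len(s):
--         if s[index].isnumeric():
--             num.append(int(s[index]))
--             index = index+1
--             continue
--         break
--     for i in range(len(num)):
--         realnum = realnum * 10 + num[i]
--         pass
--     return realnum, s[index:]
-- ===== SOURCE B (Python) =====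
-- def findrnum(s, index):
--     # pass 1: advance a cursor to find where the digit run after position index ends
--     end = index + 1
--     n = len(s)
--     while end < n and s[end].isnumeric():
--         end += 1
--     # pass 2: accumulate the value back-to-front with explicit powers of ten (no list)
--     realnum = 0
--     p = 1
--     j = end - 1
--     while j > index:
--         realnum += int(s[j]) * p
--         p *= 10
--         j -= 1
--     return realnum, s[end:]
-- ===== Notes on version B (the rewrite author's own statement) =====
-- stated objective: alternative
-- what changed: B replaces A's two forward passes (collect digits into a list with break/continue, then fold the list with an indexed range loop) by a cursor scan that only locates the end of the digit run followed by a backward pass that accumulates the value with explicit powers of ten, building no intermediate list.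
import Mathlib
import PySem

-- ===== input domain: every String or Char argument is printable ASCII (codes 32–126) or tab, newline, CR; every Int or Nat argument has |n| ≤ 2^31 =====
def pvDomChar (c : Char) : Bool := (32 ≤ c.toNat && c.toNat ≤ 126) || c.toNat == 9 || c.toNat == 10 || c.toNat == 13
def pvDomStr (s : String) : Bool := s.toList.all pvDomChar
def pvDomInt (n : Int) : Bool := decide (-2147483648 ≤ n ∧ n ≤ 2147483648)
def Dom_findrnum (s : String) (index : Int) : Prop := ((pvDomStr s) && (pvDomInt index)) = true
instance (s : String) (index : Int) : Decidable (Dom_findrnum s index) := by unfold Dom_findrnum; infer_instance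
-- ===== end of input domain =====

-- B replaces A's two forward passes (collect the digits into a list, then fold that list by
-- indexed loop) with a cursor scan that only finds where the digit run ends, followed by a
-- BACKWARD pass that accumulates the value with explicit powers of ten — no intermediate list.

-- ===== PORT A =====
-- the while loop: collects int(s[index]) into num while s[index].isnumeric(), returns (num, final index).
-- On the ASCII domain Dom, str.isnumeric is exactly Chars.isdigit and int(c) for such a digit is c.toNat - 48.
def findrnumLoopA (cs : List Char) (idx : Int) (num : List Int) : List Int × Int :=
  if _h : idx < (cs.length : Int) then
    match PySem.List.pyGet? cs idx with
    | some c =>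
      if PySem.Chars.isdigit c then
        findrnumLoopA cs (idx + 1) (num ++ [((c.toNat : Int) - 48)])
      else (num, idx)
    | none => (num, idx)  -- IndexError in Python: excluded by Pre_findrnum
  else (num, idx)
termination_by ((cs.length : Int) - idx).toNat
decreasing_by omega

def findrnum (s : String) (index : Int) : Int × String :=
  let r := findrnumLoopA s.toList (index + 1) []
  -- for i in range(len(num)): realnum = realnum * 10 + num[i]
  let realnum := (PySem.List.pyRange 0 (PySem.List.len r.1)).foldl
      (fun acc i => acc * 10 + PySem.List.pyGetD r.1 i 0) 0
  (realnum, PySem.Str.slice s (some r.2) none)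

-- ===== PORT B =====
-- pass 1: while end < n and s[end].isnumeric(): end += 1  — returns only the cursor, nothing is collected.
def findEndB (cs : List Char) (e : Int) : Int :=
  if _h : e < (cs.length : Int) then
    match PySem.List.pyGet? cs e with
    | some c => if PySem.Chars.isdigit c then findEndB cs (e + 1) else e
    | none => e  -- IndexError in Python (s[e] with e < -len): excluded by Pre_findrnum
  else e
termination_by ((cs.length : Int) - e).toNat
decreasing_by omega

-- pass 2: while j > index: realnum += int(s[j]) * p; p *= 10; j -= 1.
-- int(c) = c.toNat - 48: pass 1 only stops past digit characters, so c is an ASCII digit here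
-- (for a non-digit Python's int(c) would raise ValueError, which is unreachable on these j).
def sumBackB (cs : List Char) (j lo acc p : Int) : Int :=
  if _h : lo < j then
    match PySem.List.pyGet? cs j with
    | some c => sumBackB cs (j - 1) lo (acc + ((c.toNat : Int) - 48) * p) (p * 10)
    | none => acc  -- IndexError in Python: unreachable under Pre_findrnum
  else acc
termination_by (j - lo).toNat
decreasing_by omega

def findrnum_alt (s : String) (index : Int) : Int × String :=
  let e := findEndB s.toList (index + 1)
  (sumBackB s.toList (e - 1) index 0 1, PySem.Str.slice s (some e) none)

-- ===== PRECONDITION & SPEC =====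
-- Pre_ excludes exactly the inputs where Python A raises IndexError: index + 1 below -len(s)
-- (the first s[index] access of the loop is out of range). B raises there as well.
def Pre_findrnum (s : String) (index : Int) : Prop := -(s.toList.length : Int) ≤ index + 1
instance (s : String) (index : Int) : Decidable (Pre_findrnum s index) := by unfold Pre_findrnum; infer_instance
def pvWitness_findrnum : String × Int := ("x12+3", 0)

def Spec_findrnum (s : String) (index : Int) (out : Int × String) : Prop := out = findrnum_alt s index
instance (s : String) (index : Int) (out : Int × String) : Decidable (Spec_findrnum s index out) := by unfold Spec_findrnum; infer_instance

-- ===== CLAIM (what is proved, stated in full; the proofs are below) =====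
def Claim_equal_findrnum : Prop := ∀ (s : String) (index : Int), Dom_findrnum s index → Pre_findrnum s index → Spec_findrnum s index (findrnum s index)

-- ===== LEMMAS AND PROOFS =====

-- A's loop with accumulator num prepends num to the digits it would collect from [].
theorem findrnumLoopA_acc (n : Nat) (cs : List Char) (idx : Int) (num : List Int)
    (hn : n = (((cs.length : Int)) - idx).toNat) :
    findrnumLoopA cs idx num =
      (num ++ (findrnumLoopA cs idx []).1, (findrnumLoopA cs idx []).2) := by
  induction n generalizing idx num with
  | zero =>
    have h : ¬ idx < (cs.length : Int) := by omega
    rw [findrnumLoopA, findrnumLoopA]; simp [h]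
  | succ n ih =>
    by_cases h : idx < (cs.length : Int)
    · cases hget : PySem.List.pyGet? cs idx with
      | none => rw [findrnumLoopA, findrnumLoopA]; simp [h, hget]
      | some c =>
        by_cases hd : PySem.Chars.isdigit c
        · rw [findrnumLoopA, findrnumLoopA]
          simp only [h, dite_true, hget, hd, if_true]
          rw [ih (idx + 1) (num ++ [((c.toNat : Int) - 48)]) (by omega),
              ih (idx + 1) ([] ++ [((c.toNat : Int) - 48)]) (by omega)]
          simp
        · rw [findrnumLoopA, findrnumLoopA]; simp [h, hget, hd]
    · rw [findrnumLoopA, findrnumLoopA]; simp [h]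

-- B's first pass stops at the same index as A's loop.
theorem findEndB_eq_loopA (n : Nat) (cs : List Char) (idx : Int)
    (hn : n = (((cs.length : Int)) - idx).toNat) :
    findEndB cs idx = (findrnumLoopA cs idx []).2 := by
  induction n generalizing idx with
  | zero =>
    have h : ¬ idx < (cs.length : Int) := by omega
    rw [findEndB, findrnumLoopA]; simp [h]
  | succ n ih =>
    by_cases h : idx < (cs.length : Int)
    · cases hget : PySem.List.pyGet? cs idx with
      | none => rw [findEndB, findrnumLoopA]; simp [h, hget]
      | some c =>
        by_cases hd : PySem.Chars.isdigit c
        · rw [findEndB, findrnumLoopA]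
          simp only [h, dite_true, hget, hd, if_true]
          rw [ih (idx + 1) (by omega),
              findrnumLoopA_acc (((cs.length : Int)) - (idx + 1)).toNat cs (idx + 1)
                ([] ++ [((c.toNat : Int) - 48)]) rfl]
        · rw [findEndB, findrnumLoopA]; simp [h, hget, hd]
    · rw [findEndB, findrnumLoopA]; simp [h]

-- A's loop stops exactly len-of-collected-digits past its start.
theorem loopA_snd_eq (n : Nat) (cs : List Char) (idx : Int)
    (hn : n = (((cs.length : Int)) - idx).toNat) :
    (findrnumLoopA cs idx []).2 = idx + (findrnumLoopA cs idx []).1.length := by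
  induction n generalizing idx with
  | zero =>
    have h : ¬ idx < (cs.length : Int) := by omega
    rw [findrnumLoopA]; simp [h]
  | succ n ih =>
    by_cases h : idx < (cs.length : Int)
    · cases hget : PySem.List.pyGet? cs idx with
      | none => rw [findrnumLoopA]; simp [h, hget]
      | some c =>
        by_cases hd : PySem.Chars.isdigit c
        · rw [findrnumLoopA]
          simp only [h, dite_true, hget, hd, if_true]
          rw [findrnumLoopA_acc (((cs.length : Int)) - (idx + 1)).toNat cs (idx + 1) _ rfl,
              ih (idx + 1) (by omega)]
          simp; omega
        · rw [findrnumLoopA]; simp [h, hget, hd]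
    · rw [findrnumLoopA]; simp [h]

-- A's loop never stops beyond the length.
theorem loopA_snd_le (n : Nat) (cs : List Char) (idx : Int)
    (hn : n = (((cs.length : Int)) - idx).toNat) (hle : idx ≤ (cs.length : Int)) :
    (findrnumLoopA cs idx []).2 ≤ (cs.length : Int) := by
  induction n generalizing idx with
  | zero =>
    have h : ¬ idx < (cs.length : Int) := by omega
    rw [findrnumLoopA]; simp [h]; omega
  | succ n ih =>
    by_cases h : idx < (cs.length : Int)
    · cases hget : PySem.List.pyGet? cs idx with
      | none => rw [findrnumLoopA]; simp [h, hget]; omega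
      | some c =>
        by_cases hd : PySem.Chars.isdigit c
        · rw [findrnumLoopA]
          simp only [h, dite_true, hget, hd, if_true]
          rw [findrnumLoopA_acc (((cs.length : Int)) - (idx + 1)).toNat cs (idx + 1) _ rfl]
          exact ih (idx + 1) (by omega) (by omega)
        · rw [findrnumLoopA]; simp [h, hget, hd]; omega
    · rw [findrnumLoopA]; simp [h]; omega

-- sumBackB is affine in (acc, p).
theorem sumBackB_affine (n : Nat) (cs : List Char) (j lo : Int)
    (hn : n = (j - lo).toNat) (acc p : Int) :
    sumBackB cs j lo acc p = acc + p * sumBackB cs j lo 0 1 := by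
  induction n generalizing j acc p with
  | zero =>
    have h : ¬ lo < j := by omega
    rw [sumBackB, sumBackB]; simp [h]
  | succ n ih =>
    by_cases h : lo < j
    · cases hget : PySem.List.pyGet? cs j with
      | none => rw [sumBackB, sumBackB]; simp [h, hget]
      | some c =>
        rw [sumBackB, sumBackB]
        simp only [h, dite_true, hget]
        rw [ih (j - 1) (by omega) (acc + ((c.toNat : Int) - 48) * p) (p * 10),
            ih (j - 1) (by omega) (0 + ((c.toNat : Int) - 48) * 1) (1 * 10)]
        ring
    · rw [sumBackB, sumBackB]; simp [h]

-- Lowering the stop bound by one adds the digit at position lo, scaled by 10^(steps).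
theorem sumBackB_lower (n : Nat) (cs : List Char) (lo j : Int) (c : Char)
    (hn : n = (j - lo).toNat) (hlo : -(cs.length : Int) ≤ lo) (hj : lo ≤ j)
    (hjl : j < (cs.length : Int)) (hc : PySem.List.pyGet? cs lo = some c) :
    sumBackB cs j (lo - 1) 0 1 =
      sumBackB cs j lo 0 1 + ((c.toNat : Int) - 48) * 10 ^ (j - lo).toNat := by
  induction n generalizing j with
  | zero =>
    have hjlo : j = lo := by omega
    rw [hjlo, sumBackB, sumBackB]
    have h1 : lo - 1 < lo := by omega
    have h2 : ¬ lo < lo := by omega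
    simp only [h1, h2, dite_true, dite_false, hc]
    rw [sumBackB]
    have h3 : ¬ lo - 1 < lo - 1 := by omega
    simp only [h3, dite_false]
    norm_num
  | succ n ih =>
    have hlj : lo < j := by omega
    have hsome : ∃ d, PySem.List.pyGet? cs j = some d := by
      cases hg : PySem.List.pyGet? cs j with
      | none =>
        have hnin := (PySem.List.pyGet?_eq_none_iff cs j).mp hg
        exact absurd (by simp [PySem.Raise.InRange]; omega) hnin
      | some d => exact ⟨d, rfl⟩
    obtain ⟨d, hd⟩ := hsome
    rw [sumBackB, sumBackB]
    have h1 : lo - 1 < j := by omega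
    simp only [h1, hlj, dite_true, hd]
    rw [sumBackB_affine (j - 1 - (lo - 1)).toNat cs (j - 1) (lo - 1) rfl,
        sumBackB_affine (j - 1 - lo).toNat cs (j - 1) lo rfl,
        ih (j - 1) (by omega) (by omega) (by omega)]
    have hpow : (j - lo).toNat = (j - 1 - lo).toNat + 1 := by omega
    rw [hpow]
    ring

-- Horner fold with a non-zero seed.
theorem horner_seed (l : List Int) (a : Int) :
    l.foldl (fun r d => r * 10 + d) a = l.foldl (fun r d => r * 10 + d) 0 + a * 10 ^ l.length := by
  induction l generalizing a with
  | nil => simp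
  | cons x xs ih =>
    simp only [List.foldl_cons, List.length_cons]
    rw [ih (a * 10 + x), ih (0 * 10 + x)]
    ring

-- Main lemma: B's backward pass from (loopA's stop − 1) down to idx − 1 computes A's Horner fold.
theorem sumBack_eq_horner (n : Nat) (cs : List Char) (idx : Int)
    (hn : n = (((cs.length : Int)) - idx).toNat) (hlo : -(cs.length : Int) ≤ idx) :
    sumBackB cs ((findrnumLoopA cs idx []).2 - 1) (idx - 1) 0 1 =
      (findrnumLoopA cs idx []).1.foldl (fun r d => r * 10 + d) 0 := by
  induction n generalizing idx with
  | zero =>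
    have h : ¬ idx < (cs.length : Int) := by omega
    rw [findrnumLoopA]
    simp only [h, dite_false]
    rw [sumBackB]; simp
  | succ n ih =>
    by_cases h : idx < (cs.length : Int)
    · cases hget : PySem.List.pyGet? cs idx with
      | none =>
        rw [findrnumLoopA]
        simp only [h, dite_true, hget]
        rw [sumBackB]; simp
      | some c =>
        by_cases hd : PySem.Chars.isdigit c
        · rw [findrnumLoopA]
          simp only [h, dite_true, hget, hd, if_true]
          rw [findrnumLoopA_acc (((cs.length : Int)) - (idx + 1)).toNat cs (idx + 1)
                ([] ++ [((c.toNat : Int) - 48)]) rfl]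
          dsimp only
          have hee := loopA_snd_eq (((cs.length : Int)) - (idx + 1)).toNat cs (idx + 1) rfl
          have hel := loopA_snd_le (((cs.length : Int)) - (idx + 1)).toNat cs (idx + 1) rfl (by omega)
          have ih' := ih (idx + 1) (by omega) (by omega)
          rw [show idx + 1 - 1 = idx from by omega] at ih'
          have hstep := sumBackB_lower ((findrnumLoopA cs (idx + 1) []).2 - 1 - idx).toNat cs idx
            ((findrnumLoopA cs (idx + 1) []).2 - 1) c rfl (by omega) (by omega) (by omega) hget
          simp only [List.nil_append] at *
          rw [hstep, ih', List.singleton_append, List.foldl_cons,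
              horner_seed ((findrnumLoopA cs (idx + 1) []).1) (0 * 10 + ((c.toNat : Int) - 48))]
          have hlen : ((findrnumLoopA cs (idx + 1) []).2 - 1 - idx).toNat =
              (findrnumLoopA cs (idx + 1) []).1.length := by omega
          rw [hlen]; ring
        · rw [findrnumLoopA]
          simp only [h, dite_true, hget, hd]
          rw [sumBackB]; simp
    · rw [findrnumLoopA]
      simp only [h, dite_false]
      rw [sumBackB]; simp

-- ===== VERDICT (by name: the statement is the Claim_ definition above) =====
theorem findrnum_spec : Claim_equal_findrnum := by
  intro s index _hDom hPre
  unfold Spec_findrnum findrnum findrnum_alt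
  dsimp only
  rw [findEndB_eq_loopA (((s.toList.length : Int)) - (index + 1)).toNat _ _ rfl]
  have hmain := sumBack_eq_horner (((s.toList.length : Int)) - (index + 1)).toNat s.toList
    (index + 1) rfl hPre
  rw [show index + 1 - 1 = index from by omega] at hmain
  rw [hmain]
  simp
  rw [PySem.List.foldl_pyRange_zero_pyGetD']
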